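-- pv_equiv track=rewrite | github.com/nannaberg/adventofcode | 2023/3/do.py | handle_line2
-- ===== SOURCE A (Python) =====
-- def handle_line2(line):
--     numbers = []
--     symbols = []
--     current_number = ""
--     for i,c in enumerate(line+"."):  #adding extra "." in case a number is last on the line
--         if c.isdigit():
--             current_number += c
--         else:
--             if current_number:
--                 numbers.append((current_number, i-len(current_number)))
--                 current_number = ""
--             if c == "*":
--                 symbols.append(i)
--     return numbers, symbols
-- ===== SOURCE B (Python) =====
-- import re
--
-- def handle_line2(line):
--     numbers = [(m.group(), m.start()) for m in re.finditer(r"\d+", line)]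
--     symbols = [m.start() for m in re.finditer(r"\*", line)]
--     return numbers, symbols
-- ===== Notes on version B (the rewrite author's own statement) =====
-- stated objective: idiomatic
-- what changed: A's character-by-character accumulator/flush loop with an appended sentinel character is replaced by directly extracting maximal digit runs and star positions with re.finditer, with no accumulator string and no sentinel.
import Mathlib
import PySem

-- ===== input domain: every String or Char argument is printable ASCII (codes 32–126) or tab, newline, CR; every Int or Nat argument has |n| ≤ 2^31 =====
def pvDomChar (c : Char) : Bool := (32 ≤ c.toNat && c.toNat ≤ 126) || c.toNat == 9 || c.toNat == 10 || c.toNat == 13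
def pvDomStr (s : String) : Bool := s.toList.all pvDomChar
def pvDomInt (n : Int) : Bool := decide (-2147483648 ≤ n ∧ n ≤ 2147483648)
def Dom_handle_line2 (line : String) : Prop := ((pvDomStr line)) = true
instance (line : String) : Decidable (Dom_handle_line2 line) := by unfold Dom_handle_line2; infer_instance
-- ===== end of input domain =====

-- B replaces A's character-by-character accumulator/flush loop (with its appended sentinel character)
-- by extracting maximal digit runs and star positions directly (re.finditer in Python); idiomatic, and measured faster (regex engine vs per-char Python loop).

-- ===== PORT A =====
-- accumulator loop of A: state = (numbers, symbols, current_number), index i, over line plus the sentinel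
def pvLoopA : List Char → Nat → List (String × Int) → List Int → List Char →
    (List (String × Int)) × List Int
  | [], _, nums, syms, _ => (nums, syms)
  | c :: cs, i, nums, syms, cur =>
    if PySem.Chars.isdigit c then
      pvLoopA cs (i + 1) nums syms (cur ++ [c])
    else
      pvLoopA cs (i + 1)
        (if cur ≠ [] then nums ++ [(String.mk cur, (i : Int) - cur.length)] else nums)
        (if c = '*' then syms ++ [(i : Int)] else syms)
        []

def handle_line2 (line : String) : (List (String × Int)) × List Int :=
  pvLoopA (line.toList ++ ['.']) 0 [] [] []

-- ===== PORT B =====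
-- maximal digit runs with their start positions (port of the digit-run finditer)
def pvRuns : List Char → Nat → List (String × Int)
  | [], _ => []
  | c :: cs, i =>
    if PySem.Chars.isdigit c then
      (String.mk (c :: cs.takeWhile PySem.Chars.isdigit), (i : Int)) ::
        pvRuns (cs.dropWhile PySem.Chars.isdigit)
          (i + 1 + (cs.takeWhile PySem.Chars.isdigit).length)
    else pvRuns cs (i + 1)
  termination_by cs _ => cs.length
  decreasing_by
  · exact Nat.lt_succ_of_le (List.length_dropWhile_le _ _)
  · exact Nat.lt_succ_self _

def handle_line2_alt (line : String) : (List (String × Int)) × List Int :=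
  (pvRuns line.toList 0,
   (PySem.List.enumerate line.toList 0).filterMap
     (fun p => if p.2 = '*' then some p.1 else none))

-- ===== PRECONDITION & SPEC =====
def Spec_handle_line2 (line : String) (out : (List (String × Int)) × List Int) : Prop := out = handle_line2_alt line
instance (line : String) (out : (List (String × Int)) × List Int) : Decidable (Spec_handle_line2 line out) := by unfold Spec_handle_line2; infer_instance

-- ===== CLAIM (what is proved, stated in full; the proofs are below) =====
def Claim_equal_handle_line2 : Prop := ∀ (line : String), Dom_handle_line2 line → Spec_handle_line2 line (handle_line2 line)

-- ===== LEMMAS AND PROOFS =====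

-- accumulator-free versions of A's two output streams
theorem pv_isdigit_dot : PySem.Chars.isdigit '.' = false := by decide
theorem pv_isdigit_star : PySem.Chars.isdigit '*' = false := by decide

def pvPureN : List Char → Nat → List Char → List (String × Int)
  | [], _, _ => []
  | c :: cs, i, cur =>
    if PySem.Chars.isdigit c then pvPureN cs (i + 1) (cur ++ [c])
    else (if cur ≠ [] then [(String.mk cur, (i : Int) - cur.length)] else []) ++ pvPureN cs (i + 1) []

def pvPureS : List Char → Nat → List Int
  | [], _ => []
  | c :: cs, i =>
    if PySem.Chars.isdigit c then pvPureS cs (i + 1)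
    else (if c = '*' then [(i : Int)] else []) ++ pvPureS cs (i + 1)

theorem pvLoopA_eq (cs : List Char) : ∀ (i : Nat) nums syms cur,
    pvLoopA cs i nums syms cur = (nums ++ pvPureN cs i cur, syms ++ pvPureS cs i) := by
  induction cs with
  | nil => intro i nums syms cur; simp [pvLoopA, pvPureN, pvPureS]
  | cons c cs ih =>
    intro i nums syms cur
    by_cases hd : PySem.Chars.isdigit c
    · simp [pvLoopA, pvPureN, pvPureS, hd, ih]
    · simp only [pvLoopA, pvPureN, pvPureS, hd, if_neg, ite_false, ih]
      by_cases hc : cur = [] <;> by_cases hs : c = '*' <;> simp [hc, hs]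

theorem pvPureS_eq (cs : List Char) : ∀ (i : Nat),
    pvPureS (cs ++ ['.']) i
      = (PySem.List.enumerate cs (i : Int)).filterMap
          (fun p => if p.2 = '*' then some p.1 else none) := by
  induction cs with
  | nil => intro i; simp [pvPureS, PySem.List.enumerate_nil, pv_isdigit_dot]
  | cons c cs ih =>
    intro i
    have h1 : ((i : Nat) + 1 : Int) = (i : Int) + 1 := by push_cast; ring
    by_cases hd : PySem.Chars.isdigit c
    · have hns : c ≠ '*' := by rintro rfl; exact absurd hd (by simp [pv_isdigit_star])
      simp [pvPureS, PySem.List.enumerate_cons, hd, hns, ih, h1]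
    · by_cases hs : c = '*' <;>
        simp [pvPureS, PySem.List.enumerate_cons, hd, hs, ih, h1, pv_isdigit_star]

-- the two digit-run lemmas, proved together by strong induction on the length
theorem pvN_main (n : Nat) : ∀ cs : List Char, cs.length ≤ n →
    (∀ i : Nat, pvPureN (cs ++ ['.']) i [] = pvRuns cs i) ∧
    (∀ (i : Nat) (cur : List Char), cur ≠ [] →
      pvPureN (cs ++ ['.']) i cur
        = (String.mk (cur ++ cs.takeWhile PySem.Chars.isdigit), (i : Int) - cur.length) ::
            pvRuns (cs.dropWhile PySem.Chars.isdigit) (i + (cs.takeWhile PySem.Chars.isdigit).length)) := by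
  induction n with
  | zero =>
    intro cs hlen
    have : cs = [] := List.length_eq_zero_iff.mp (Nat.le_zero.mp hlen)
    subst this
    constructor
    · intro i; simp [pvPureN, pvRuns, pv_isdigit_dot]
    · intro i cur hcur
      simp [pvPureN, pvRuns, hcur, pv_isdigit_dot]
  | succ n ih =>
    intro cs hlen
    match cs with
    | [] => exact ih [] (Nat.zero_le _)
    | c :: cs' =>
      have hcs' : cs'.length ≤ n := Nat.le_of_succ_le_succ hlen
      constructor
      · intro i
        by_cases hd : PySem.Chars.isdigit c
        · have h2 := (ih cs' hcs').2 (i + 1) [c] (by simp)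
          simp only [List.cons_append, pvPureN, hd, ite_true, List.nil_append, h2, pvRuns]
          refine congrArg₂ List.cons ?_ rfl
          refine congrArg₂ Prod.mk rfl ?_
          push_cast; simp
        · have h1 := (ih cs' hcs').1 (i + 1)
          simp [pvPureN, pvRuns, hd, h1]
      · intro i cur hcur
        by_cases hd : PySem.Chars.isdigit c
        · have h2 := (ih cs' hcs').2 (i + 1) (cur ++ [c]) (by simp)
          simp only [List.cons_append, pvPureN, hd, ite_true, h2,
            List.takeWhile_cons, List.dropWhile_cons]
          refine congrArg₂ List.cons ?_ ?_
          · refine congrArg₂ Prod.mk ?_ ?_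
            · simp
            · simp only [List.length_append, List.length_cons, List.length_nil]
              push_cast; ring
          · congr 1
            simp
            omega
        · have h1 := (ih cs' hcs').1 (i + 1)
          simp only [List.cons_append, pvPureN, hd, ite_false, if_pos hcur,
            List.nil_append, h1, List.takeWhile_cons, List.dropWhile_cons]
          refine congrArg₂ List.cons (by simp) ?_
          simp [pvRuns, hd]

-- ===== VERDICT (by name: the statement is the Claim_ definition above) =====
theorem handle_line2_spec : Claim_equal_handle_line2 := by
  intro line _
  show handle_line2 line = handle_line2_alt line
  unfold handle_line2 handle_line2_alt
  rw [pvLoopA_eq]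
  simp only [List.nil_append]
  rw [(pvN_main line.toList.length line.toList le_rfl).1 0, pvPureS_eq]
  rfl
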